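-- pv_equiv track=rewrite | github.com/jmarusak/codility | resources/python/max_counters.py | solution
-- ===== SOURCE A (Python) =====
-- def solution(N, A):
--     M = len(A)
--     max_counter = 0
--     temp_counter = 0
--     counters = [0] * N
--
--     for K in range(M):
--         counter = A[K] - 1
--         if counter < N:
--             counters[counter] = max(counters[counter], max_counter) + 1
--             if counters[counter] > temp_counter:
--                 temp_counter = counters[counter]
--         else:
--             max_counter = temp_counter
--
--     for i in range(N):
--         if counters[i] < max_counter:
--             counters[i] = max_counter
--
--     return counters
-- ===== SOURCE B (Python) =====
-- def solution(N, A):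
--     counters = [0] * N
--     for a in A:
--         if a - 1 < N:
--             counters[a - 1] += 1
--         else:
--             m = max(counters) if counters else 0
--             counters = [m] * N
--     return counters
-- ===== Notes on version B (the rewrite author's own statement) =====
-- stated objective: simpler
-- what changed: B replaces A's lazy-maximum bookkeeping (a running floor max_counter, a running max temp_counter, and a final patch-up pass over the counters) with an eager simulation that keeps only the counters list, incrementing on an update op and rewriting the whole list to [max(counters)]*N on a max-all op, returning it directly with no second pass.
import Mathlib
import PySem

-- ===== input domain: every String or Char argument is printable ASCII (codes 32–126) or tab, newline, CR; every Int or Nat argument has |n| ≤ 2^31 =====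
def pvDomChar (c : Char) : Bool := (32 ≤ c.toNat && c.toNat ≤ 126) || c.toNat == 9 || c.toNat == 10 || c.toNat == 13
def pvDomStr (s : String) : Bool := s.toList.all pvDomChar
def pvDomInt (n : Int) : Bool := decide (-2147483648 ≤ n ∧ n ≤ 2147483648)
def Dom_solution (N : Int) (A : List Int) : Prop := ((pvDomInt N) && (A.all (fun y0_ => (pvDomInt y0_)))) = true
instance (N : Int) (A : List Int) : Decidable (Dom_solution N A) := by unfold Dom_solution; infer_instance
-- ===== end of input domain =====

-- B drops A's lazy max_counter/temp_counter bookkeeping and final patch-up pass: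
-- it keeps the counters eagerly, rewriting the whole list on each max-all op (simpler, not faster).

-- ===== PORT A =====
-- loop body of A's 'for K in range(M)': state (max_counter, temp_counter, counters)
def stepA (N : Int) (s : Int × Int × List Int) (a : Int) : Int × Int × List Int :=
  let c := a - 1
  if c < N then
    -- counters[counter] read/write: exact under Pre_ (index in range, incl. Python's negative wrap)
    let v := max (PySem.List.pyGetD s.2.2 c 0) s.1 + 1
    (s.1, if v > s.2.1 then v else s.2.1, PySem.List.pySetD s.2.2 c v)
  else
    (s.2.1, s.2.1, s.2.2)

def solution (N : Int) (A : List Int) : List Int :=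
  let s := A.foldl (stepA N) (0, 0, List.replicate N.toNat 0)
  -- 'for i in range(N): if counters[i] < max_counter: counters[i] = max_counter'
  s.2.2.map (fun x => if x < s.1 then s.1 else x)

-- ===== PORT B =====
-- loop body of B's 'for a in A': state is just the eager counters list
def stepB (N : Int) (cs : List Int) (a : Int) : List Int :=
  if a - 1 < N then
    PySem.List.pySetD cs (a - 1) (PySem.List.pyGetD cs (a - 1) 0 + 1)
  else
    let m := if cs = [] then 0 else (PySem.List.max? cs (fun y => y)).getD 0
    List.replicate N.toNat m

def solution_alt (N : Int) (A : List Int) : List Int :=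
  A.foldl (stepB N) (List.replicate N.toNat 0)

-- ===== PRECONDITION & SPEC =====
-- Pre_ excludes exactly the inputs where Python A raises IndexError: some op a with a - 1 < N
-- but a - 1 < -max(N,0), i.e. out of range for the length-max(N,0) counters list even after
-- Python's negative-index wrap.  Negative in-range indices (-N ≤ a-1 < 0) are INSIDE Pre_:
-- there both A and B wrap around identically and the equivalence covers them; on excluded
-- inputs B raises IndexError too.
def Pre_solution (N : Int) (A : List Int) : Prop :=
  ∀ a ∈ A, a - 1 < N → PySem.Raise.InRange N.toNat (a - 1)
instance (N : Int) (A : List Int) : Decidable (Pre_solution N A) := by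
  unfold Pre_solution; infer_instance

def pvWitness_solution : Int × List Int := (5, [3, 4, 4, 6, 1, 4, 4])

def Spec_solution (N : Int) (A : List Int) (out : List Int) : Prop := out = solution_alt N A
instance (N : Int) (A : List Int) (out : List Int) : Decidable (Spec_solution N A out) := by unfold Spec_solution; infer_instance

-- ===== CLAIM (what is proved, stated in full; the proofs are below) =====
def Claim_equal_solution : Prop := ∀ (N : Int) (A : List Int), Dom_solution N A → Pre_solution N A → Spec_solution N A (solution N A)

-- ===== LEMMAS AND PROOFS =====

-- normalized Python index (the Nat position pyGetD/pySetD actually touch)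
def nidx (n : Nat) (i : Int) : Nat := (PySem.List.pyIdx? n i).getD 0

lemma nidx_lt {n : Nat} {i : Int} (h : PySem.Raise.InRange n i) : nidx n i < n := by
  obtain ⟨h1, h2⟩ := h
  unfold nidx PySem.List.pyIdx?
  split_ifs with h3 h4 h5 <;> simp <;> omega

lemma pyGetD_nidx {xs : List Int} {i : Int} (h : PySem.Raise.InRange xs.length i) (d : Int) :
    PySem.List.pyGetD xs i d = xs.getD (nidx xs.length i) d := by
  obtain ⟨h1, h2⟩ := h
  unfold PySem.List.pyGetD PySem.List.pyGet? nidx PySem.List.pyIdx?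
  split_ifs with h3 h4 h5 <;> simp_all [List.getD] <;> omega

lemma pySetD_nidx {xs : List Int} {i : Int} (h : PySem.Raise.InRange xs.length i) (v : Int) :
    PySem.List.pySetD xs i v = xs.set (nidx xs.length i) v := by
  obtain ⟨h1, h2⟩ := h
  unfold PySem.List.pySetD PySem.List.pySet? nidx PySem.List.pyIdx?
  split_ifs with h3 h4 h5 <;> simp_all <;> omega

lemma foldl_max_sup (a : Int) : ∀ (xs : List Int) (b : Int),
    xs.foldl max (max a b) = max a (xs.foldl max b) := by
  intro xs
  induction xs with
  | nil => intro b; simp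
  | cons x t ih =>
      intro b
      simp only [List.foldl_cons, max_assoc]
      exact ih (max b x)

lemma foldl_max_set (v : Int) : ∀ (xs : List Int) (j : Nat) (a : Int) (hj : j < xs.length),
    xs[j] ≤ v → (xs.set j v).foldl max a = max (xs.foldl max a) v := by
  intro xs
  induction xs with
  | nil => intro j a hj; simp at hj
  | cons x t ih =>
      intro j a hj hle
      cases j with
      | zero =>
          have hxv : x ≤ v := by simpa using hle
          simp only [List.set_cons_zero, List.foldl_cons]
          rw [max_comm a v, foldl_max_sup v t a, max_comm a x, foldl_max_sup x t a]
          generalize t.foldl max a = F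
          omega
      | succ j =>
          have hj' : j < t.length := by simp at hj; omega
          have hle' : t[j] ≤ v := by simpa using hle
          simp only [List.set_cons_succ, List.foldl_cons]
          exact ih j (max a x) hj' hle'

lemma foldl_max_replicate_zero : ∀ (n : Nat), (List.replicate n (0 : Int)).foldl max 0 = 0 := by
  intro n
  induction n with
  | zero => simp
  | succ n ih => simp [List.replicate_succ, ih]

lemma foldl_max_replicate_pos {n : Nat} (hn : 0 < n) (a : Int) (ha : 0 ≤ a) :
    (List.replicate n a).foldl max 0 = a := by
  cases n with
  | zero => omega
  | succ m =>
      simp only [List.replicate_succ, List.foldl_cons]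
      have h3 : (List.replicate m a).foldl max a = a := by
        rcases PySem.List.foldl_max_mem (List.replicate m a) a with h4 | h4
        · exact h4
        · exact List.eq_of_mem_replicate h4
      rw [foldl_max_sup 0 (List.replicate m a) a, h3]
      omega

-- the loop invariant: B's eager counters E are A's lazy counters L flattened at the floor mc,
-- tc is the running max of E, and lengths stay max(N,0)
lemma loop_inv (N : Int) : ∀ (A : List Int) (mc tc : Int) (L E : List Int),
    (∀ a ∈ A, a - 1 < N → PySem.Raise.InRange N.toNat (a - 1)) →
    E = L.map (fun x => max x mc) → tc = E.foldl max 0 → L.length = N.toNat → 0 ≤ mc →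
    A.foldl (stepB N) E
        = (A.foldl (stepA N) (mc, tc, L)).2.2.map (fun x => max x (A.foldl (stepA N) (mc, tc, L)).1)
      ∧ (A.foldl (stepA N) (mc, tc, L)).2.1 = (A.foldl (stepB N) E).foldl max 0
      ∧ (A.foldl (stepA N) (mc, tc, L)).2.2.length = N.toNat
      ∧ 0 ≤ (A.foldl (stepA N) (mc, tc, L)).1 := by
  intro A
  induction A with
  | nil =>
      intro mc tc L E hpre hE htc hlen hmc
      refine ⟨hE, by simpa using htc, by simpa using hlen, hmc⟩
  | cons a A ih =>
      intro mc tc L E hpre hE htc hlen hmc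
      have hEL : E.length = L.length := by rw [hE]; simp
      have hEnn : ∀ y ∈ E, 0 ≤ y := by
        intro y hy
        rw [hE] at hy
        simp only [List.mem_map] at hy
        obtain ⟨x, _, rfl⟩ := hy
        omega
      simp only [List.foldl_cons]
      by_cases hc : a - 1 < N
      · -- update op
        have hr : PySem.Raise.InRange N.toNat (a - 1) := hpre a (by simp) hc
        have hrL : PySem.Raise.InRange L.length (a - 1) := by rwa [hlen]
        have hrE : PySem.Raise.InRange E.length (a - 1) := by rwa [hEL]
        set j := nidx L.length (a - 1) with hj
        have hjlt : j < L.length := nidx_lt hrL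
        have hjltE : j < E.length := by omega
        have hjE : nidx E.length (a - 1) = j := by rw [hEL]
        have hgeA : PySem.List.pyGetD L (a - 1) 0 = L.getD j 0 := pyGetD_nidx hrL 0
        have hgetB : PySem.List.pyGetD E (a - 1) 0 = E.getD j 0 := by
          rw [pyGetD_nidx hrE 0, hjE]
        have hEj : E.getD j 0 = max (L.getD j 0) mc := by
          rw [hE, List.getD_eq_getElem _ 0 (by simpa using hjlt),
            List.getD_eq_getElem _ 0 hjlt, List.getElem_map]
        have hsA : stepA N (mc, tc, L) a
            = (mc, if max (L.getD j 0) mc + 1 > tc then max (L.getD j 0) mc + 1 else tc,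
                L.set j (max (L.getD j 0) mc + 1)) := by
          simp only [stepA, if_pos hc, hgeA, pySetD_nidx hrL, ← hj]
        have hsB : stepB N E a = E.set j (E.getD j 0 + 1) := by
          simp only [stepB, if_pos hc, hgetB, pySetD_nidx hrE, hjE]
        rw [hsA, hsB]
        apply ih
        · intro b hb hbc; exact hpre b (by simp [hb]) hbc
        · -- E' = L'.map
          rw [hE, List.map_set]
          congr 1
          rw [← hE, hEj]
          omega
        · -- tc' = running max of E'
          have hEg : E[j]'hjltE = E.getD j 0 := (List.getD_eq_getElem E 0 hjltE).symm
          rw [foldl_max_set _ E j 0 hjltE (by omega), ← htc, hEj]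
          omega
        · simpa using hlen
        · exact hmc
      · -- max-all op
        have hsA : stepA N (mc, tc, L) a = (tc, tc, L) := by
          simp only [stepA, if_neg hc]
        have htc0 : 0 ≤ tc := by
          rw [htc]; exact (PySem.List.le_foldl_max E 0).1
        rw [hsA]
        by_cases hN : N.toNat = 0
        · -- N <= 0 : counters stay []
          have hL : L = [] := List.eq_nil_of_length_eq_zero (by omega)
          have hEe : E = [] := by rw [hE, hL]; simp
          have hsB : stepB N E a = [] := by
            unfold stepB
            rw [if_neg hc, hN]
            rfl
          have htce : tc = 0 := by rw [htc, hEe]; simp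
          rw [hsB]
          apply ih
          · intro b hb hbc; exact hpre b (by simp [hb]) hbc
          · rw [hL]; simp
          · simp [htce]
          · simp [hL, hN]
          · omega
        · -- N > 0 : counters all become the current max, which is tc
          have hEne : E ≠ [] := by
            intro h; rw [h] at hEL; simp at hEL; omega
          obtain ⟨x, t, rfl⟩ := List.exists_cons_of_ne_nil hEne
          have hx0 : (0 : Int) ≤ x := hEnn x (by simp)
          have hm : (if (x :: t) = ([] : List Int) then (0:Int)
              else (PySem.List.max? (x :: t) (fun y => y)).getD 0) = tc := by
            rw [if_neg (by simp), PySem.List.max?_id_cons]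
            simp only [Option.getD_some]
            have h1 : tc = max 0 (t.foldl max x) := by
              rw [htc]; simp only [List.foldl_cons]; exact foldl_max_sup 0 t x
            have h2 := (PySem.List.le_foldl_max t x).1
            omega
          have hsB : stepB N (x :: t) a = List.replicate N.toNat tc := by
            simp only [stepB, if_neg hc, hm]
          rw [hsB]
          have hle : ∀ y ∈ L, y ≤ tc := by
            intro y hy
            have : max y mc ∈ x :: t := by rw [hE]; exact List.mem_map_of_mem hy
            have h2 := (PySem.List.le_foldl_max (x :: t) 0).2 _ this
            rw [htc]; omega
          apply ih
          · intro b hb hbc; exact hpre b (by simp [hb]) hbc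
          · -- replicate N.toNat tc = L.map (max · tc)
            apply List.ext_getElem
            · simp [hlen]
            · intro i h1 h2
              have hiL : i < L.length := by simpa using h2
              simp only [List.getElem_replicate, List.getElem_map]
              have : L[i] ≤ tc := hle _ (L.getElem_mem hiL)
              omega
          · rw [foldl_max_replicate_pos (by omega) tc htc0]
          · simpa using hlen
          · exact htc0

-- ===== VERDICT (by name: the statement is the Claim_ definition above) =====
theorem solution_spec : Claim_equal_solution := by
  intro N A _ hpre
  unfold Spec_solution solution solution_alt
  have h := loop_inv N A 0 0 (List.replicate N.toNat 0) (List.replicate N.toNat 0) hpre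
    (by simp) (by rw [foldl_max_replicate_zero]) (by simp) le_rfl
  rw [h.1]
  apply List.map_congr_left
  intro x _
  have h0 := h.2.2.2
  omega
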